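-- pv_equiv track=rewrite | github.com/HandMi/coding-problems | AdventOfCode/2019/04/2/AOC19_04_2.py | has_double_digits
-- ===== SOURCE A (Python) =====
-- def has_double_digits(x):
--     result = False
--     match = False
--     last_match = False
--     for i in range(0, len(x)-1):
--         new_match = x[i] == x[i+1]
--         result = result or (
--             not last_match and match and not new_match)
--         last_match = match
--         match = new_match
--
--     result = result or (not last_match and match)
--     return result
-- ===== SOURCE B (Python) =====
-- def has_double_digits(x):
--     i = 0
--     n = len(x)
--     while i < n:
--         j = i
--         while j < n and x[j] == x[i]:
--             j += 1
--         if j - i == 2: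
--             return True
--         i = j
--     return False
-- ===== Notes on version B (the rewrite author's own statement) =====
-- stated objective: alternative
-- what changed: Replaces A's pairwise index loop carrying match/last_match boolean state with a run-length scan that walks maximal runs of equal adjacent characters and returns True as soon as some run has length exactly 2.
import Mathlib
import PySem

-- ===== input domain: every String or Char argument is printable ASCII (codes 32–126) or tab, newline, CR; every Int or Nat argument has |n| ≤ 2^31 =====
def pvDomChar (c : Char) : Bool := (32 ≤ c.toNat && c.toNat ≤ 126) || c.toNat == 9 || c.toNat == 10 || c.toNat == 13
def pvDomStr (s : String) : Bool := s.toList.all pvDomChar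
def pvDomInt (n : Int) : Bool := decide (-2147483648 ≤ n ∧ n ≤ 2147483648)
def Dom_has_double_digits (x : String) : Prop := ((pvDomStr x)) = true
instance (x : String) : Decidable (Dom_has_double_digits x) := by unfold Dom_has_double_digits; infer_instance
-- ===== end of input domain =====

-- B replaces A's pairwise boolean state machine (match/last_match flags) by a
-- run-length scan over maximal runs of equal characters (objective: alternative).


-- ===== PORT A =====
-- A's loop 'for i in range(0, len(x)-1)' carrying (result, match, last_match);
-- x[i] / x[i+1] are always in range here, ported as pyGetD.
def has_double_digits (x : String) : Bool :=
  let xs := x.toList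
  let st := (PySem.List.pyRange 0 ((xs.length : Int) - 1) 1).foldl
    (fun (s : Bool × Bool × Bool) i =>
      let new_match := PySem.List.pyGetD xs i ' ' == PySem.List.pyGetD xs (i + 1) ' '
      (s.1 || (!s.2.2 && s.2.1 && !new_match), new_match, s.2.1))
    (false, false, false)
  st.1 || (!st.2.2 && st.2.1)

-- ===== PORT B =====
-- B's inner while loop: how many leading characters of t extend the run of c.
def countRun (c : Char) : List Char → Nat
  | [] => 0
  | a :: t => if a == c then countRun c t + 1 else 0

-- B's outer while loop: walk maximal runs; True iff some run has length exactly 2.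
def altRun : List Char → Bool
  | [] => false
  | c :: t =>
    let k := countRun c t
    if k + 1 == 2 then true else altRun (t.drop k)
termination_by l => l.length
decreasing_by simp_all

def has_double_digits_alt (x : String) : Bool := altRun x.toList

-- ===== PRECONDITION & SPEC =====
def Spec_has_double_digits (x : String) (out : Bool) : Prop := out = has_double_digits_alt x
instance (x : String) (out : Bool) : Decidable (Spec_has_double_digits x out) := by unfold Spec_has_double_digits; infer_instance

-- ===== CLAIM (what is proved, stated in full; the proofs are below) =====
def Claim_equal_has_double_digits : Prop := ∀ (x : String), Dom_has_double_digits x → Spec_has_double_digits x (has_double_digits x)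

-- ===== LEMMAS AND PROOFS =====

@[simp] theorem altRun_nil : altRun [] = false := by
  rw [altRun.eq_def]

@[simp] theorem altRun_cons (c : Char) (t : List Char) :
    altRun (c :: t) = (if countRun c t + 1 == 2 then true else altRun (t.drop (countRun c t))) := by
  rw [altRun.eq_def]

-- A's loop step and final read-out, on adjacent pairs.
def pvStep (s : Bool × Bool × Bool) (p : Char × Char) : Bool × Bool × Bool :=
  (s.1 || (!s.2.2 && s.2.1 && !(p.1 == p.2)), p.1 == p.2, s.2.1)
def pvFin (s : Bool × Bool × Bool) : Bool := s.1 || (!s.2.2 && s.2.1)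

-- A's loop, written structurally over the tail with the previous character carried.
def aGo (prev : Char) (l : List Char) (r m lst : Bool) : Bool :=
  match l with
  | [] => r || (!lst && m)
  | c :: t => aGo c t (r || (!lst && m && !(prev == c))) (prev == c) m

theorem foldl_zip_eq_aGo (l : List Char) (prev : Char) (r m lst : Bool) :
    pvFin (((prev :: l).zip l).foldl pvStep (r, m, lst)) = aGo prev l r m lst := by
  induction l generalizing prev r m lst with
  | nil => simp [pvFin, aGo]
  | cons c t ih => simpa [pvStep, aGo] using ih c (r || (!lst && m && !(prev == c))) (prev == c) m

-- The pair list that A's index loop reads is exactly cs.zip cs.tail.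
theorem map_pairs (cs : List Char) :
    (PySem.List.pyRange 0 ((cs.length : Int) - 1) 1).map
      (fun i => (PySem.List.pyGetD cs i ' ', PySem.List.pyGetD cs (i + 1) ' ')) = cs.zip cs.tail := by
  apply List.ext_getElem
  · simp [PySem.List.length_pyRange_one]
  · intro k h1 h2
    have hk : k < cs.length - 1 := by
      simp [PySem.List.length_pyRange_one] at h1
      omega
    simp only [List.getElem_map]
    rw [PySem.List.getElem_pyRange_one]
    have e0 : (0 : Int) + (k : Int) = ((k : Nat) : Int) := by ring
    rw [e0, PySem.List.pyGetD_natCast]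
    have e1 : ((k : Nat) : Int) + 1 = ((k + 1 : Nat) : Int) := by push_cast; ring
    rw [e1, PySem.List.pyGetD_natCast]
    have hk1 : k < cs.length := by omega
    have hk2 : k + 1 < cs.length := by omega
    simp [List.getElem_zip, hk1, hk2, List.getElem_tail]

-- The result flag accumulates by ||.
theorem aGo_acc (l : List Char) (prev : Char) (r m lst : Bool) :
    aGo prev l r m lst = (r || aGo prev l false m lst) := by
  induction l generalizing prev r m lst with
  | nil => simp [aGo]
  | cons c t ih =>
    simp only [aGo]
    rw [ih c (r || (!lst && m && !(prev == c))) (prev == c) m,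
        ih c (false || (!lst && m && !(prev == c))) (prev == c) m]
    simp [Bool.or_assoc]

-- Main run-structure induction: A's state machine versus B's run scan, in each of the
-- three reachable flag states (new run; run of exactly two so far; run of three or more).
theorem aGo_runs : ∀ (n : Nat) (t : List Char), t.length ≤ n →
    (∀ c lst, aGo c t false false lst = altRun (c :: t)) ∧
    (∀ c, aGo c t false true false =
      (if countRun c t = 0 then true else altRun (t.drop (countRun c t)))) ∧
    (∀ c, aGo c t false true true = altRun (t.drop (countRun c t))) := by
  intro n
  induction n with
  | zero =>
    intro t ht
    have : t = [] := List.eq_nil_of_length_eq_zero (Nat.le_zero.mp ht)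
    subst this
    refine ⟨?_, ?_, ?_⟩ <;> intro c <;> simp [aGo, countRun]
  | succ n ih =>
    intro t ht
    cases t with
    | nil => refine ⟨?_, ?_, ?_⟩ <;> intro c <;> simp [aGo, countRun]
    | cons c' t' =>
      have ht' : t'.length ≤ n := by simp at ht; omega
      obtain ⟨IH0, IH1, IH2⟩ := ih t' ht'
      refine ⟨?_, ?_, ?_⟩
      · -- state: start of a new run
        intro c lst
        by_cases h : c' = c
        · subst h
          simp only [aGo, beq_self_eq_true, Bool.and_false, Bool.not_true, Bool.or_false]
          rw [IH1]
          by_cases h0 : countRun c' t' = 0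
          · simp [countRun, h0]
          · simp [countRun, h0]
        · have hbe : (c == c') = false := beq_eq_false_iff_ne.mpr (Ne.symm h)
          simp only [aGo, hbe, Bool.and_false, Bool.false_and, Bool.or_false]
          rw [IH0 c' false]
          simp [countRun, h]
      · -- state: run of exactly two so far
        intro c
        by_cases h : c' = c
        · subst h
          simp only [aGo, beq_self_eq_true, Bool.not_false, Bool.not_true, Bool.and_false,
            Bool.or_false, Bool.true_and]
          rw [IH2]
          simp [countRun, List.drop_succ_cons]
        · have hbe : (c == c') = false := beq_eq_false_iff_ne.mpr (Ne.symm h)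
          simp only [aGo, hbe, Bool.not_false, Bool.and_true, Bool.false_or]
          rw [aGo_acc]
          simp [countRun, h]
      · -- state: run of three or more
        intro c
        by_cases h : c' = c
        · subst h
          simp only [aGo, beq_self_eq_true, Bool.not_true, Bool.and_false, Bool.false_and,
            Bool.or_false]
          rw [IH2]
          simp [countRun, List.drop_succ_cons]
        · have hbe : (c == c') = false := beq_eq_false_iff_ne.mpr (Ne.symm h)
          simp only [aGo, hbe, Bool.not_true, Bool.false_and, Bool.or_false]
          rw [IH0 c' true]
          simp [countRun, h]

-- ===== VERDICT (by name: the statement is the Claim_ definition above) =====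
theorem has_double_digits_spec : Claim_equal_has_double_digits := by
  intro x _
  unfold Spec_has_double_digits
  show has_double_digits x = has_double_digits_alt x
  simp only [has_double_digits, has_double_digits_alt]
  cases hcs : x.toList with
  | nil => simp [PySem.List.pyRange_one_eq_nil]
  | cons c t =>
    show pvFin ((PySem.List.pyRange 0 (((c :: t).length : Int) - 1) 1).foldl
      (fun s i => pvStep s (PySem.List.pyGetD (c :: t) i ' ', PySem.List.pyGetD (c :: t) (i + 1) ' '))
      (false, false, false)) = altRun (c :: t)
    rw [← List.foldl_map]
    rw [map_pairs (c :: t)]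
    show pvFin (((c :: t).zip t).foldl pvStep (false, false, false)) = altRun (c :: t)
    rw [foldl_zip_eq_aGo]
    exact (aGo_runs t.length t (le_refl _)).1 c false
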